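-- pv_equiv track=rewrite | github.com/edt-yxz-zzd/python3_src | seed/data_funcs/rngs.py | rngs_op__iter_intersect_range_ex
-- ===== SOURCE A (Python) =====
-- import bisect
--
-- def valid_range(range, /):
--     if type(range) is not tuple:
--         return False
--     begin, end = range
--     if not type(begin) is int is type(end):
--         return False
--     return begin < end
--
-- def check_range(rng, /):
--     if not valid_range(rng):
--         raise TypeError('not valid_range({})'.format(rng))
--
-- def rngs_op__get_maybe_range_contained_ex(rngs, i, /):
--     'rngs -> i -> (may rng, imay idx) #[imay_idx >=0]==>>[[rngs[idx][0] <= i][[idx+1<len(rngs)]==>>[i < rngs[idx+1][0]]][[may_rng is None]<==>[rngs[idx][1] <= i]]]'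
--     L = len(rngs)
--
--     j = i + 1
--     idx = bisect.bisect_left(rngs, (j,j)) - 1
--     if idx < 0:
--         assert not L or rngs[0][0] > i
--         return None, idx
--
--     begin, end = rng = rngs[idx]
--     assert begin <= i
--     if not i < end:
--         assert idx + 1 == L or rngs[idx+1][0] > i
--         return None, idx
--     return rng, idx
--
-- def rngs_op__iter_intersect_range_ex(rngs, rng, /):
--     'rngs -> rng -> Iter<(idx, common_rng)>'
--     check_range(rng)
--     begin, end = rng
--     may_rng, imay_idx = rngs_op__get_maybe_range_contained_ex(rngs, begin)
--     L = len(rngs)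
--     def may_intersect(_rng, begin, end, /):
--         '-> may common_rng'
--         _begin, _end = _rng
--         if not begin <= _begin: raise logic-err
--         curr_begin = max(begin, _begin)
--         next_begin = min(_end, end)
--         if not curr_begin < next_begin:
--             return None
--         common_rng = curr_begin, next_begin
--         return common_rng
--
--     if not may_rng is None:
--         rng0 = may_rng
--         idx = imay_idx
--         assert rng0 is rngs[idx]
--
--         begin0, end0 = rng0
--         assert begin0 <= begin < end0
--         begin1 = min(end0, end)
--         assert begin < begin1
--         common_rng0 = begin, begin1
--         yield idx, common_rng0
--         begin = begin1
--     #take care for rngs is touch_ranges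
--     idx = imay_idx + 1
--     for idx in range(idx, L):
--         _rng = rngs[idx]
--         m = may_intersect(_rng, begin, end)
--         if m is None:break
--         common_rng = m
--         yield idx, common_rng
--         _, begin = common_rng
--     return
-- ===== SOURCE B (Python) =====
-- def valid_range(range, /):
--     if type(range) is not tuple:
--         return False
--     begin, end = range
--     if not type(begin) is int is type(end):
--         return False
--     return begin < end
--
-- def check_range(rng, /):
--     if not valid_range(rng):
--         raise TypeError('not valid_range({})'.format(rng))
--
-- def rngs_op__iter_intersect_range_ex(rngs, rng, /):
--     'rngs -> rng -> Iter<(idx, common_rng)>'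
--     check_range(rng)
--     begin, end = rng
--     for idx, (_begin, _end) in enumerate(rngs):
--         if _begin >= end:
--             break
--         lo = max(begin, _begin)
--         hi = min(end, _end)
--         if lo < hi:
--             yield idx, (lo, hi)
-- ===== Notes on version B (the rewrite author's own statement) =====
-- stated objective: simpler
-- what changed: Replaces A's bisect search plus special partially-contained-range prologue plus separate tail loop (with a mutating 'begin' accumulator) by one uniform enumerate pass that intersects every range with the ORIGINAL query range and breaks once a range starts at or past its end.
-- outside the precondition, e.g. on rngs_op__iter_intersect_range_ex([(3, 4), (0, 2)], (3, 4)): A returns [], B returns [(0, (3, 4))]; on rngs_op__iter_intersect_range_ex([(0, 10), (2, 3)], (5, 6)): A returns [], B returns [(0, (5, 6))]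
import Mathlib
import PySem

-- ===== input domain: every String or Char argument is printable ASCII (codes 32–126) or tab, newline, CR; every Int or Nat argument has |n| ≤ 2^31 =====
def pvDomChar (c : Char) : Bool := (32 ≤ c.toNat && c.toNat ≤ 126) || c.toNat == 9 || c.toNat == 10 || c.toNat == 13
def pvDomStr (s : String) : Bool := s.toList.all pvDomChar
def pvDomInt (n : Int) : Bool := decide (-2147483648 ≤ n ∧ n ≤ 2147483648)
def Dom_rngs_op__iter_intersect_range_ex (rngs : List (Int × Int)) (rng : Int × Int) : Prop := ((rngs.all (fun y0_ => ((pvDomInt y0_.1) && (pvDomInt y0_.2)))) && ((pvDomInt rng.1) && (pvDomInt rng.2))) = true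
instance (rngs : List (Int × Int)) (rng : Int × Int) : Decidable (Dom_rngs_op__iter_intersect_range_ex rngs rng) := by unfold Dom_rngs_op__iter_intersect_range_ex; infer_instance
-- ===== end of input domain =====

-- B replaces A's bisect + partial-range prologue + tail loop by one uniform linear
-- intersection pass over enumerate(rngs) (objective: simpler; not faster).
-- Both versions are Python generators; the equivalence is about the yielded sequence.


-- ===== PORT A =====

-- Python tuple comparison '<' on pairs of ints (lexicographic), as used by bisect.
def pvTupLt (p q : Int × Int) : Bool :=
  decide (p.1 < q.1 ∨ (p.1 = q.1 ∧ p.2 < q.2))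

-- bisect.bisect_left(rngs, key): the stdlib binary search, transliterated
-- (fuel = hi - lo bounds the iteration count; it is a totality guard only).
def pvBisectLeftGo (xs : List (Int × Int)) (key : Int × Int) : Nat → Nat → Nat → Nat
  | 0, lo, _ => lo
  | fuel + 1, lo, hi =>
    if lo < hi then
      let mid := (lo + hi) / 2
      -- xs[mid]: mid is always in range here (lo ≤ mid < hi ≤ len); getD default never read
      if pvTupLt (xs.getD mid (0, 0)) key then pvBisectLeftGo xs key fuel (mid + 1) hi
      else pvBisectLeftGo xs key fuel lo mid
    else lo

def pvBisectLeft (xs : List (Int × Int)) (key : Int × Int) (lo hi : Nat) : Nat :=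
  pvBisectLeftGo xs key (hi - lo) lo hi

-- rngs_op__get_maybe_range_contained_ex;  the asserts of the Python (which hold on
-- every input admitted by Pre_) are dropped.
def pvGetMaybe (rngs : List (Int × Int)) (i : Int) : Option (Int × Int) × Int :=
  let j := i + 1
  let idx : Int := (pvBisectLeft rngs (j, j) 0 rngs.length : Int) - 1
  if idx < 0 then (none, idx)
  else
    -- rngs[idx]: idx is in range here (0 ≤ idx < len); getD default never read
    let p := rngs.getD idx.toNat (0, 0)
    if i < p.2 then (some p, idx) else (none, idx)

-- the 'for idx in range(idx, L)' loop, with may_intersect inlined as in the source;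
-- the 'raise logic-err' branch (a NameError, unreachable under Pre_) is ported as stopping.
def pvALoopGo (rngs : List (Int × Int)) (end_ : Int) : Nat → Nat → Int → List (Int × (Int × Int))
  | 0, _, _ => []
  | fuel + 1, idx, begin_ =>
    if h : idx < rngs.length then
      let p := rngs[idx]
      if begin_ ≤ p.1 then
        let cb := max begin_ p.1
        let nb := min p.2 end_
        if cb < nb then ((idx : Int), (cb, nb)) :: pvALoopGo rngs end_ fuel (idx + 1) nb
        else []
      else []  -- 'raise logic-err' (unreachable under Pre_)
    else []

-- (fuel = number of remaining indices; a totality guard only)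
def pvALoop (rngs : List (Int × Int)) (end_ : Int) (idx : Nat) (begin_ : Int) :
    List (Int × (Int × Int)) :=
  pvALoopGo rngs end_ (rngs.length - idx) idx begin_

def rngs_op__iter_intersect_range_ex (rngs : List (Int × Int)) (rng : Int × Int) :
    List (Int × (Int × Int)) :=
  -- check_range: raises TypeError unless rng.1 < rng.2; such inputs are excluded by Pre_
  if rng.1 < rng.2 then
    let begin_ := rng.1
    let end_ := rng.2
    let m := pvGetMaybe rngs begin_
    match m.1 with
    | some p =>
        let b1 := min p.2 end_
        (m.2, (begin_, b1)) :: pvALoop rngs end_ (m.2 + 1).toNat b1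
    | none => pvALoop rngs end_ (m.2 + 1).toNat begin_
  else []

-- ===== PORT B =====

def pvBLoop (begin_ end_ : Int) (idx : Nat) : List (Int × Int) → List (Int × (Int × Int))
  | [] => []
  | p :: rest =>
    if p.1 ≥ end_ then []
    else
      let lo := max begin_ p.1
      let hi := min end_ p.2
      if lo < hi then ((idx : Int), (lo, hi)) :: pvBLoop begin_ end_ (idx + 1) rest
      else pvBLoop begin_ end_ (idx + 1) rest

def rngs_op__iter_intersect_range_ex_alt (rngs : List (Int × Int)) (rng : Int × Int) :
    List (Int × (Int × Int)) :=
  -- check_range, as in Source B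
  if rng.1 < rng.2 then pvBLoop rng.1 rng.2 0 rngs else []

-- ===== PRECONDITION & SPEC =====

-- Pre_ restricts to the inputs on which A's bisect-based scan is well defined and its
-- value is the intended intersection list: a valid query range (otherwise both Pythons
-- raise TypeError), no degenerate pair sitting exactly at (begin+1, ≤begin) (A's asserts
-- can fail there), and one of: rngs is the documented shape (valid pairwise-disjoint
-- sorted ranges); or no range intersects the query; or only the first range intersects
-- and every later range starts at or after the query's end.  On other unsorted /
-- overlapping lists A raises (AssertionError/NameError) or returns accidental values
-- of its bisect landing in the middle of an unsorted list.
def Pre_rngs_op__iter_intersect_range_ex (rngs : List (Int × Int)) (rng : Int × Int) : Prop :=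
  rng.1 < rng.2 ∧
  (∀ p ∈ rngs, ¬(p.1 = rng.1 + 1 ∧ p.2 ≤ rng.1)) ∧
  (((∀ p ∈ rngs, p.1 < p.2) ∧ List.Pairwise (fun p q => p.2 ≤ q.1) rngs) ∨
   (∀ p ∈ rngs, ¬(max rng.1 p.1 < min rng.2 p.2)) ∨
   (rngs ≠ [] ∧ (∀ p ∈ rngs.take 1, max rng.1 p.1 < min rng.2 p.2) ∧
     (∀ q ∈ rngs.drop 1, rng.2 ≤ q.1)))

instance (rngs : List (Int × Int)) (rng : Int × Int) :
    Decidable (Pre_rngs_op__iter_intersect_range_ex rngs rng) := by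
  unfold Pre_rngs_op__iter_intersect_range_ex; infer_instance

def pvWitness_rngs_op__iter_intersect_range_ex : (List (Int × Int)) × (Int × Int) :=
  ([(0, 2), (3, 5), (5, 7)], (1, 6))

def Spec_rngs_op__iter_intersect_range_ex (rngs : List (Int × Int)) (rng : Int × Int)
    (out : List (Int × (Int × Int))) : Prop :=
  out = rngs_op__iter_intersect_range_ex_alt rngs rng

instance (rngs : List (Int × Int)) (rng : Int × Int) (out : List (Int × (Int × Int))) :
    Decidable (Spec_rngs_op__iter_intersect_range_ex rngs rng out) := by
  unfold Spec_rngs_op__iter_intersect_range_ex; infer_instance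

-- ===== CLAIM (what is proved, stated in full; the proofs are below) =====
def Claim_equal_rngs_op__iter_intersect_range_ex : Prop :=
  ∀ (rngs : List (Int × Int)) (rng : Int × Int),
    Dom_rngs_op__iter_intersect_range_ex rngs rng →
    Pre_rngs_op__iter_intersect_range_ex rngs rng →
    Spec_rngs_op__iter_intersect_range_ex rngs rng (rngs_op__iter_intersect_range_ex rngs rng)

-- ===== LEMMAS AND PROOFS =====

theorem pv_witness_ok :
    Dom_rngs_op__iter_intersect_range_ex pvWitness_rngs_op__iter_intersect_range_ex.1
      pvWitness_rngs_op__iter_intersect_range_ex.2 ∧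
    Pre_rngs_op__iter_intersect_range_ex pvWitness_rngs_op__iter_intersect_range_ex.1
      pvWitness_rngs_op__iter_intersect_range_ex.2 := by
  constructor <;> decide

-- binary-search partition: bisect_left splits a list on which the predicate
-- 'element < key' is downward closed
theorem pvBisectLeftGo_spec (xs : List (Int × Int)) (key : Int × Int)
    (mono : ∀ i j : Nat, i ≤ j → j < xs.length →
      pvTupLt (xs.getD j (0, 0)) key = true → pvTupLt (xs.getD i (0, 0)) key = true) :
    ∀ fuel lo hi : Nat, hi - lo ≤ fuel → lo ≤ hi → hi ≤ xs.length →
    (∀ i : Nat, i < lo → pvTupLt (xs.getD i (0, 0)) key = true) →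
    (∀ i : Nat, hi ≤ i → i < xs.length → pvTupLt (xs.getD i (0, 0)) key = false) →
    lo ≤ pvBisectLeftGo xs key fuel lo hi ∧ pvBisectLeftGo xs key fuel lo hi ≤ hi ∧
    (∀ i : Nat, i < pvBisectLeftGo xs key fuel lo hi → pvTupLt (xs.getD i (0, 0)) key = true) ∧
    (∀ i : Nat, pvBisectLeftGo xs key fuel lo hi ≤ i → i < xs.length →
      pvTupLt (xs.getD i (0, 0)) key = false) := by
  intro fuel
  induction fuel with
  | zero =>
    intro lo hi hn hlh hhL hbelow habove
    have heq : lo = hi := by omega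
    subst heq
    exact ⟨le_refl _, le_refl _, hbelow, habove⟩
  | succ n ih =>
    intro lo hi hn hlh hhL hbelow habove
    simp only [pvBisectLeftGo]
    by_cases h : lo < hi
    · rw [if_pos h]
      set mid := (lo + hi) / 2 with hmid
      have hmlt : mid < hi := by omega
      have hmge : lo ≤ mid := by omega
      cases hP : pvTupLt (xs.getD mid (0, 0)) key with
      | true =>
        rw [if_pos rfl]
        have hb' : ∀ i : Nat, i < mid + 1 → pvTupLt (xs.getD i (0, 0)) key = true := by
          intro i hi'
          exact mono i mid (by omega) (by omega) hP
        have := ih (mid + 1) hi (by omega) (by omega) hhL hb' habove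
        exact ⟨by omega, this.2.1, this.2.2.1, this.2.2.2⟩
      | false =>
        rw [if_neg (by simp)]
        have ha' : ∀ i : Nat, mid ≤ i → i < xs.length →
            pvTupLt (xs.getD i (0, 0)) key = false := by
          intro i hi' hiL
          cases hx : pvTupLt (xs.getD i (0, 0)) key
          · rfl
          · have hcontra := mono mid i hi' hiL hx
            rw [hP] at hcontra
            simp at hcontra
        have := ih lo mid (by omega) (by omega) (by omega) hbelow ha'
        exact ⟨this.1, by omega, this.2.2.1, this.2.2.2⟩
    · rw [if_neg h]
      have heq : lo = hi := by omega
      subst heq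
      exact ⟨le_refl _, le_refl _, hbelow, habove⟩

theorem pvBisectLeft_spec (xs : List (Int × Int)) (key : Int × Int)
    (mono : ∀ i j : Nat, i ≤ j → j < xs.length →
      pvTupLt (xs.getD j (0, 0)) key = true → pvTupLt (xs.getD i (0, 0)) key = true) :
    ∀ n lo hi : Nat, hi - lo ≤ n → lo ≤ hi → hi ≤ xs.length →
    (∀ i : Nat, i < lo → pvTupLt (xs.getD i (0, 0)) key = true) →
    (∀ i : Nat, hi ≤ i → i < xs.length → pvTupLt (xs.getD i (0, 0)) key = false) →
    lo ≤ pvBisectLeft xs key lo hi ∧ pvBisectLeft xs key lo hi ≤ hi ∧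
    (∀ i : Nat, i < pvBisectLeft xs key lo hi → pvTupLt (xs.getD i (0, 0)) key = true) ∧
    (∀ i : Nat, pvBisectLeft xs key lo hi ≤ i → i < xs.length →
      pvTupLt (xs.getD i (0, 0)) key = false) := by
  intro _n lo hi _hn hlh hhL hbelow habove
  exact pvBisectLeftGo_spec xs key mono (hi - lo) lo hi (le_refl _) hlh hhL hbelow habove

-- characterisation of the tuple comparison against the doubled key, for a valid range
theorem pvTupLt_char (p : Int × Int) (k : Int) (hv : p.1 < p.2) :
    pvTupLt p (k, k) = true ↔ p.1 < k := by
  unfold pvTupLt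
  simp only [decide_eq_true_eq]
  constructor
  · rintro (h | ⟨h1, h2⟩)
    · exact h
    · omega
  · exact fun h => Or.inl h

-- A's indexed tail loop equals B's structural loop on the same suffix, for possibly
-- different begin-accumulators, as long as both lie at or below every remaining start.
theorem loop_agree_go (rngs : List (Int × Int)) (end_ : Int) :
    ∀ fuel idx : Nat, ∀ bA bB : Int, rngs.length - idx ≤ fuel →
    (∀ p ∈ rngs.drop idx, p.1 < p.2) →
    List.Pairwise (fun p q : Int × Int => p.2 ≤ q.1) (rngs.drop idx) →
    (∀ p ∈ rngs.drop idx, bA ≤ p.1) →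
    (∀ p ∈ rngs.drop idx, bB ≤ p.1) →
    pvALoopGo rngs end_ fuel idx bA = pvBLoop bB end_ idx (rngs.drop idx) := by
  intro fuel
  induction fuel with
  | zero =>
    intro idx bA bB hn hv hp hA hB
    have hge : rngs.length ≤ idx := by omega
    rw [List.drop_eq_nil_of_le hge]
    simp [pvALoopGo, pvBLoop]
  | succ n ih =>
    intro idx bA bB hn hv hp hA hB
    by_cases h : idx < rngs.length
    · have hdrop : rngs.drop idx = rngs[idx] :: rngs.drop (idx + 1) :=
        List.drop_eq_getElem_cons h
      set p := rngs[idx] with hpdef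
      have hmemp : p ∈ rngs.drop idx := by rw [hdrop]; exact List.mem_cons_self
      have hvp : p.1 < p.2 := hv p hmemp
      have hAp : bA ≤ p.1 := hA p hmemp
      have hBp : bB ≤ p.1 := hB p hmemp
      have htail : ∀ q ∈ rngs.drop (idx + 1), p.2 ≤ q.1 := by
        rw [hdrop] at hp
        exact (List.pairwise_cons.mp hp).1
      rw [hdrop, pvBLoop]
      simp only [pvALoopGo, dif_pos h, ← hpdef]
      rw [if_pos hAp]
      have hmaxA : max bA p.1 = p.1 := max_eq_right hAp
      have hmaxB : max bB p.1 = p.1 := max_eq_right hBp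
      by_cases hbrk : p.1 ≥ end_
      · have h1 : ¬ max bA p.1 < min p.2 end_ := by
          rw [hmaxA]; omega
        rw [if_neg h1, if_pos hbrk]
      · have h1 : max bA p.1 < min p.2 end_ := by rw [hmaxA]; omega
        have h2 : max bB p.1 < min end_ p.2 := by rw [hmaxB]; omega
        rw [if_pos h1, if_neg hbrk]
        simp only [if_pos h2]
        have hmm : min p.2 end_ = min end_ p.2 := min_comm _ _
        rw [hmaxA, hmaxB, hmm]
        congr 1
        have hrec := ih (idx + 1) (min end_ p.2) bB (by omega)
          (fun q hq => hv q (by rw [hdrop]; exact List.mem_cons_of_mem _ hq))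
          (by rw [hdrop] at hp; exact (List.pairwise_cons.mp hp).2)
          (fun q hq => le_trans (min_le_right _ _) (htail q hq))
          (fun q hq => hB q (by rw [hdrop]; exact List.mem_cons_of_mem _ hq))
        rw [← hmm] at hrec ⊢
        exact hrec
    · have hge : rngs.length ≤ idx := by omega
      rw [List.drop_eq_nil_of_le hge]
      simp only [pvALoopGo, dif_neg h, pvBLoop]

theorem loop_agree (rngs : List (Int × Int)) (end_ : Int) :
    ∀ n idx : Nat, ∀ bA bB : Int, rngs.length - idx ≤ n →
    (∀ p ∈ rngs.drop idx, p.1 < p.2) →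
    List.Pairwise (fun p q : Int × Int => p.2 ≤ q.1) (rngs.drop idx) →
    (∀ p ∈ rngs.drop idx, bA ≤ p.1) →
    (∀ p ∈ rngs.drop idx, bB ≤ p.1) →
    pvALoop rngs end_ idx bA = pvBLoop bB end_ idx (rngs.drop idx) := by
  intro _n idx bA bB _hn hv hp hA hB
  exact loop_agree_go rngs end_ (rngs.length - idx) idx bA bB (le_refl _) hv hp hA hB

-- B's loop skips a prefix whose ranges all end at or before the (original) begin
theorem bLoop_prefix (begin_ end_ : Int) (hbe : begin_ < end_) :
    ∀ n : Nat, ∀ (xs : List (Int × Int)) (idx : Nat),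
    (∀ p ∈ xs.take n, p.1 < p.2 ∧ p.2 ≤ begin_) →
    pvBLoop begin_ end_ idx xs = pvBLoop begin_ end_ (idx + n) (xs.drop n) := by
  intro n
  induction n with
  | zero => intro xs idx _; simp
  | succ n ih =>
    intro xs idx hpre
    cases xs with
    | nil => simp [pvBLoop]
    | cons p rest =>
      have hp : p.1 < p.2 ∧ p.2 ≤ begin_ := by
        apply hpre; simp [List.take_succ_cons]
      rw [pvBLoop]
      have hnb : ¬ p.1 ≥ end_ := by omega
      rw [if_neg hnb]
      have hno : ¬ max begin_ p.1 < min end_ p.2 := by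
        have h1 : begin_ ≤ max begin_ p.1 := le_max_left _ _
        have h2 : min end_ p.2 ≤ p.2 := min_le_right _ _
        omega
      simp only [if_neg hno]
      have := ih rest (idx + 1) (fun q hq => hpre q (by simp [List.take_succ_cons, hq]))
      rw [this]
      congr 1
      omega


-- binary-search boundary invariant, valid on ARBITRARY lists: the returned position r
-- has a probed 'element < key' at r-1 (unless r = 0) and a probed 'element ≥ key' at r
-- (unless r = length)
theorem pvBisectLeftGo_inv (xs : List (Int × Int)) (key : Int × Int) :
    ∀ fuel lo hi : Nat, hi - lo ≤ fuel → lo ≤ hi → hi ≤ xs.length →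
    (lo = 0 ∨ pvTupLt (xs.getD (lo - 1) (0, 0)) key = true) →
    (hi = xs.length ∨ pvTupLt (xs.getD hi (0, 0)) key = false) →
    lo ≤ pvBisectLeftGo xs key fuel lo hi ∧ pvBisectLeftGo xs key fuel lo hi ≤ hi ∧
    (pvBisectLeftGo xs key fuel lo hi = 0 ∨
      pvTupLt (xs.getD (pvBisectLeftGo xs key fuel lo hi - 1) (0, 0)) key = true) ∧
    (pvBisectLeftGo xs key fuel lo hi = xs.length ∨
      pvTupLt (xs.getD (pvBisectLeftGo xs key fuel lo hi) (0, 0)) key = false) := by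
  intro fuel
  induction fuel with
  | zero =>
    intro lo hi hn hlh hhL h1 h2
    have heq : lo = hi := by omega
    subst heq
    exact ⟨le_refl _, le_refl _, h1, h2⟩
  | succ n ih =>
    intro lo hi hn hlh hhL h1 h2
    simp only [pvBisectLeftGo]
    by_cases h : lo < hi
    · rw [if_pos h]
      set mid := (lo + hi) / 2 with hmid
      have hmlt : mid < hi := by omega
      have hmge : lo ≤ mid := by omega
      cases hP : pvTupLt (xs.getD mid (0, 0)) key with
      | true =>
        rw [if_pos rfl]
        have := ih (mid + 1) hi (by omega) (by omega) hhL
          (Or.inr (by simpa using hP)) h2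
        exact ⟨by omega, this.2.1, this.2.2.1, this.2.2.2⟩
      | false =>
        rw [if_neg (by simp)]
        have := ih lo mid (by omega) (by omega) (by omega) h1 (Or.inr hP)
        exact ⟨this.1, by omega, this.2.2.1, this.2.2.2⟩
    · rw [if_neg h]
      have heq : lo = hi := by omega
      subst heq
      exact ⟨le_refl _, le_refl _, h1, h2⟩

-- arithmetic readings of the tuple comparison against the doubled key
theorem pvTupLt_true_le (p : Int × Int) (b : Int)
    (hcav : ¬(p.1 = b + 1 ∧ p.2 ≤ b))
    (hP : pvTupLt p (b + 1, b + 1) = true) : p.1 ≤ b := by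
  unfold pvTupLt at hP
  simp only [decide_eq_true_eq] at hP
  rcases hP with h | ⟨h1, h2⟩
  · omega
  · exact absurd ⟨h1, by omega⟩ hcav

theorem pvTupLt_false_gt (p : Int × Int) (b : Int)
    (hP : pvTupLt p (b + 1, b + 1) = false) : b < p.1 := by
  unfold pvTupLt at hP
  simp only [decide_eq_false_iff_not, not_or, not_and] at hP
  omega

-- B's loop returns [] when no range intersects the query
theorem bLoop_nointer (begin_ end_ : Int) :
    ∀ (xs : List (Int × Int)) (idx : Nat),
    (∀ p ∈ xs, ¬(max begin_ p.1 < min end_ p.2)) →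
    pvBLoop begin_ end_ idx xs = [] := by
  intro xs
  induction xs with
  | nil => intro idx _; rfl
  | cons p rest ih =>
    intro idx hno
    rw [pvBLoop]
    by_cases hb : p.1 ≥ end_
    · rw [if_pos hb]
    · rw [if_neg hb]
      have h1 : ¬ max begin_ p.1 < min end_ p.2 := hno p List.mem_cons_self
      simp only [if_neg h1]
      exact ih (idx + 1) (fun q hq => hno q (List.mem_cons_of_mem _ hq))

-- A's loop runs on an empty index range
theorem aLoop_nil (rngs : List (Int × Int)) (end_ : Int) (idx : Nat) (begin_ : Int)
    (h : rngs.length ≤ idx) : pvALoop rngs end_ idx begin_ = [] := by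
  unfold pvALoop
  rw [Nat.sub_eq_zero_of_le h]
  rfl

-- A's loop breaks at its first element
theorem aLoop_break (rngs : List (Int × Int)) (end_ : Int) (idx : Nat) (begin_ : Int)
    (h : idx < rngs.length) (hb : begin_ ≤ rngs[idx].1)
    (hbr : ¬ max begin_ rngs[idx].1 < min rngs[idx].2 end_) :
    pvALoop rngs end_ idx begin_ = [] := by
  unfold pvALoop
  have hf : rngs.length - idx = (rngs.length - (idx + 1)) + 1 := by omega
  rw [hf]
  simp only [pvALoopGo, dif_pos h]
  rw [if_pos hb, if_neg hbr]

-- A's loop yields its first element and breaks at (or runs out at) the second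
theorem aLoop_yield_break (rngs : List (Int × Int)) (end_ : Int) (idx : Nat) (begin_ : Int)
    (h : idx < rngs.length) (hb : begin_ ≤ rngs[idx].1)
    (hy : max begin_ rngs[idx].1 < min rngs[idx].2 end_)
    (hnext : ∀ _ : idx + 1 < rngs.length, end_ ≤ rngs[idx + 1].1) :
    pvALoop rngs end_ idx begin_ =
      [((idx : Int), (max begin_ rngs[idx].1, min rngs[idx].2 end_))] := by
  unfold pvALoop
  have hf : rngs.length - idx = (rngs.length - (idx + 1)) + 1 := by omega
  rw [hf]
  simp only [pvALoopGo, dif_pos h]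
  rw [if_pos hb, if_pos hy]
  congr 1
  by_cases h2 : idx + 1 < rngs.length
  · have hf2 : rngs.length - (idx + 1) = (rngs.length - (idx + 2)) + 1 := by omega
    rw [hf2]
    simp only [pvALoopGo, dif_pos h2]
    have hgt := hnext h2
    have hble : min rngs[idx].2 end_ ≤ rngs[idx + 1].1 := le_trans (min_le_right _ _) hgt
    rw [if_pos hble]
    have hnb : ¬ max (min rngs[idx].2 end_) rngs[idx + 1].1 < min rngs[idx + 1].2 end_ := by
      have hm : max (min rngs[idx].2 end_) rngs[idx + 1].1 = rngs[idx + 1].1 :=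
        max_eq_right hble
      have : min rngs[idx + 1].2 end_ ≤ end_ := min_le_right _ _
      omega
    rw [if_neg hnb]
  · have h0 : rngs.length - (idx + 1) = 0 := by omega
    rw [h0]
    rfl

-- B's loop yields its first element and breaks at (or runs out at) the second
theorem bLoop_yield_break (begin_ end_ : Int) (idx : Nat) (p0 : Int × Int)
    (rest : List (Int × Int))
    (hy : max begin_ p0.1 < min end_ p0.2)
    (hnext : ∀ q ∈ rest, end_ ≤ q.1) :
    pvBLoop begin_ end_ idx (p0 :: rest) =
      [((idx : Int), (max begin_ p0.1, min end_ p0.2))] := by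
  rw [pvBLoop]
  have hnb : ¬ p0.1 ≥ end_ := by
    have h1 : p0.1 ≤ max begin_ p0.1 := le_max_right _ _
    have h2 : min end_ p0.2 ≤ end_ := min_le_left _ _
    omega
  rw [if_neg hnb]
  simp only [if_pos hy]
  congr 1
  cases rest with
  | nil => rfl
  | cons q rest' =>
    rw [pvBLoop]
    rw [if_pos (hnext q List.mem_cons_self)]

-- ===== VERDICT (by name: the statement is the Claim_ definition above) =====
theorem rngs_op__iter_intersect_range_ex_spec : Claim_equal_rngs_op__iter_intersect_range_ex := by
  intro rngs rng _hdom hpre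
  obtain ⟨hbe, hcav, hd⟩ := hpre
  unfold Spec_rngs_op__iter_intersect_range_ex
  unfold rngs_op__iter_intersect_range_ex rngs_op__iter_intersect_range_ex_alt
  rw [if_pos hbe, if_pos hbe]
  set begin_ := rng.1
  set end_ := rng.2
  set L := rngs.length with hL
  have hinv := pvBisectLeftGo_inv rngs (begin_ + 1, begin_ + 1) L 0 L
    (by omega) (by omega) (le_refl _) (Or.inl rfl) (Or.inl rfl)
  set r := pvBisectLeft rngs (begin_ + 1, begin_ + 1) 0 L with hr
  have hreq : r = pvBisectLeftGo rngs (begin_ + 1, begin_ + 1) L 0 L := by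
    rw [hr]; unfold pvBisectLeft; rw [Nat.sub_zero]
  rw [← hreq] at hinv
  obtain ⟨-, hrL, hr0P, hrLP⟩ := hinv
  rcases hd with ⟨hv, hp⟩ | hN | hD2
  · -- case 1: sorted, pairwise-disjoint, valid ranges (the documented domain)
    have mono : ∀ i j : Nat, i ≤ j → j < rngs.length →
        pvTupLt (rngs.getD j (0, 0)) (begin_ + 1, begin_ + 1) = true →
        pvTupLt (rngs.getD i (0, 0)) (begin_ + 1, begin_ + 1) = true := by
      intro i j hij hj h
      have hi : i < rngs.length := by omega
      rw [List.getD_eq_getElem _ _ hj] at h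
      rw [List.getD_eq_getElem _ _ hi]
      rw [pvTupLt_char _ _ (hv _ (rngs.getElem_mem hj))] at h
      rw [pvTupLt_char _ _ (hv _ (rngs.getElem_mem hi))]
      rcases Nat.lt_or_ge i j with hlt | hge
      · have := (List.pairwise_iff_getElem.mp hp) i j hi hj hlt
        have := hv _ (rngs.getElem_mem hi)
        omega
      · have : i = j := by omega
        subst this; exact h
    have hspec := pvBisectLeft_spec rngs (begin_ + 1, begin_ + 1) mono L 0 L
      (by omega) (by omega) (le_refl _) (by intro i hi; omega)
      (by intro i hi hiL; omega)
    set r := pvBisectLeft rngs (begin_ + 1, begin_ + 1) 0 L with hr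
    obtain ⟨-, hrL, hlt, hge⟩ := hspec
    have hlt' : ∀ i : Nat, i < r → (hi : i < rngs.length) → rngs[i].1 ≤ begin_ := by
      intro i hi hiL
      have := hlt i hi
      rw [List.getD_eq_getElem _ _ hiL, pvTupLt_char _ _ (hv _ (rngs.getElem_mem hiL))] at this
      omega
    have hge' : ∀ i : Nat, r ≤ i → (hi : i < rngs.length) → begin_ < rngs[i].1 := by
      intro i hi hiL
      have := hge i hi hiL
      rw [List.getD_eq_getElem _ _ hiL] at this
      have hc := pvTupLt_char rngs[i] (begin_ + 1) (hv _ (rngs.getElem_mem hiL))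
      rcases Int.lt_or_le rngs[i].1 (begin_ + 1) with h | h
      · rw [hc.mpr h] at this; cases this
      · omega
    -- membership facts about the suffix from index r
    have hsufgt : ∀ p ∈ rngs.drop r, begin_ < p.1 := by
      intro p hpmem
      obtain ⟨k, hk, hkeq⟩ := List.mem_iff_getElem.mp hpmem
      rw [List.getElem_drop] at hkeq
      subst hkeq
      exact hge' (r + k) (by omega) (by simp at hk; omega)
    -- unfold pvGetMaybe
    unfold pvGetMaybe
    simp only [← hL, ← hr]
    by_cases hr0 : (r : Int) - 1 < 0
    · -- r = 0 : no candidate containing range, loop from 0 on both sides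
      have hre : r = 0 := by omega
      rw [if_pos hr0]
      simp only
      have : ((r : Int) - 1 + 1).toNat = r := by omega
      rw [this, hre]
      have := loop_agree rngs end_ L 0 begin_ begin_ (by omega)
        (by simpa using hv) (by simpa using hp)
        (by intro p hpm; exact le_of_lt (hsufgt p (by rw [hre]; exact hpm)))
        (by intro p hpm; exact le_of_lt (hsufgt p (by rw [hre]; exact hpm)))
      simpa using this
    · rw [if_neg hr0]
      have hr1 : 1 ≤ r := by omega
      have hidxL : r - 1 < rngs.length := by omega
      have htn : ((r : Int) - 1).toNat = r - 1 := by omega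
      have hgetd : rngs.getD ((r : Int) - 1).toNat (0, 0) = rngs[r - 1] := by
        rw [htn, List.getD_eq_getElem _ _ hidxL]
      set p0 := rngs[r - 1] with hp0
      have hb0 : p0.1 ≤ begin_ := hlt' (r - 1) (by omega) hidxL
      have hv0 : p0.1 < p0.2 := hv _ (rngs.getElem_mem hidxL)
      -- ends of the ranges strictly before r-1 are ≤ p0.1 ≤ begin_
      have hpref : ∀ q ∈ rngs.take (r - 1), q.1 < q.2 ∧ q.2 ≤ begin_ := by
        intro q hq
        obtain ⟨k, hk, hkeq⟩ := List.mem_iff_getElem.mp hq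
        rw [List.getElem_take] at hkeq
        have hkL : k < rngs.length := by
          have := hk; simp at this; omega
        have hkr : k < r - 1 := by
          have := hk; simp at this; omega
        subst hkeq
        refine ⟨hv _ (rngs.getElem_mem hkL), ?_⟩
        have h1 := (List.pairwise_iff_getElem.mp hp) k (r - 1) hkL hidxL hkr
        have h2 : rngs[r - 1].1 ≤ begin_ := hlt' (r - 1) (by omega) hidxL
        omega
      -- pairwise/valid on the suffix from r
      have hvdrop : ∀ q ∈ rngs.drop r, q.1 < q.2 := fun q hq => hv q (List.mem_of_mem_drop hq)
      have hpdrop : List.Pairwise (fun p q : Int × Int => p.2 ≤ q.1) (rngs.drop r) := hp.drop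
      have hdropr1 : rngs.drop (r - 1) = p0 :: rngs.drop r := by
        have h1 : r - 1 + 1 = r := by omega
        rw [List.drop_eq_getElem_cons hidxL, h1, ← hp0]
      have hend0 : ∀ q ∈ rngs.drop r, p0.2 ≤ q.1 := by
        have hpd : List.Pairwise (fun p q : Int × Int => p.2 ≤ q.1) (rngs.drop (r - 1)) :=
          hp.drop
        rw [hdropr1] at hpd
        exact (List.pairwise_cons.mp hpd).1
      rw [hgetd]
      by_cases hcont : begin_ < p0.2
      · -- partially containing range: A yields its prologue element
        rw [if_pos hcont]
        dsimp only
        have htn2 : ((r : Int) - 1 + 1).toNat = r := by omega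
        rw [htn2]
        -- B side: skip the first r-1 ranges, then the head p0 yields the same element
        rw [bLoop_prefix begin_ end_ hbe (r - 1) rngs 0 hpref]
        rw [hdropr1, pvBLoop]
        have hnb : ¬ p0.1 ≥ end_ := by omega
        rw [if_neg hnb]
        have hyield : max begin_ p0.1 < min end_ p0.2 := by
          have := max_eq_left hb0
          rw [this]; omega
        simp only [if_pos hyield]
        rw [max_eq_left hb0, min_comm end_ p0.2]
        have hidxeq : ((0 + (r - 1) : Nat) : Int) = (r : Int) - 1 := by omega
        rw [hidxeq]
        congr 1
        have := loop_agree rngs end_ L r (min p0.2 end_) begin_ (by omega)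
          hvdrop hpdrop
          (fun q hq => le_trans (min_le_left _ _) (hend0 q hq))
          (fun q hq => le_of_lt (hsufgt q hq))
        rw [this]
        congr 1
        omega
      · -- p0 ends at or before begin: nothing partial, loop from r on both sides
        rw [if_neg hcont]
        dsimp only
        have htn2 : ((r : Int) - 1 + 1).toNat = r := by omega
        rw [htn2]
        have hpref' : ∀ q ∈ rngs.take r, q.1 < q.2 ∧ q.2 ≤ begin_ := by
          intro q hq
          obtain ⟨k, hk, hkeq⟩ := List.mem_iff_getElem.mp hq
          rw [List.getElem_take] at hkeq
          have hkL : k < rngs.length := by have := hk; simp at this; omega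
          have hkr : k < r := by have := hk; simp at this; omega
          subst hkeq
          refine ⟨hv _ (rngs.getElem_mem hkL), ?_⟩
          have he1 : rngs[r - 1].1 ≤ begin_ := by rw [← hp0]; exact hb0
          have he2 : rngs[r - 1].2 ≤ begin_ := by rw [← hp0]; omega
          rcases Nat.lt_or_ge k (r - 1) with hlt2 | hge2
          · have := (List.pairwise_iff_getElem.mp hp) k (r - 1) hkL hidxL hlt2
            omega
          · have : k = r - 1 := by omega
            subst this
            omega
        rw [bLoop_prefix begin_ end_ hbe r rngs 0 hpref']
        have := loop_agree rngs end_ L r begin_ begin_ (by omega)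
          hvdrop hpdrop
          (fun q hq => le_of_lt (hsufgt q hq))
          (fun q hq => le_of_lt (hsufgt q hq))
        rw [this]
        congr 1
        omega
  · -- case 2: no range intersects the query: both sides return []
    have hB : pvBLoop begin_ end_ 0 rngs = [] := bLoop_nointer begin_ end_ rngs 0 hN
    rw [hB]
    unfold pvGetMaybe
    simp only [← hL, ← hr]
    by_cases hr0 : (r : Int) - 1 < 0
    · rw [if_pos hr0]
      dsimp only
      have hre : r = 0 := by omega
      have ht0 : ((r : Int) - 1 + 1).toNat = 0 := by omega
      rw [ht0]
      by_cases hL0 : rngs.length = 0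
      · exact aLoop_nil rngs end_ 0 begin_ (by omega)
      · have h0L : 0 < rngs.length := by omega
        have hPf : pvTupLt (rngs.getD 0 (0, 0)) (begin_ + 1, begin_ + 1) = false := by
          rcases hrLP with hEq | hPf
          · omega
          · rwa [hre] at hPf
        rw [List.getD_eq_getElem _ _ h0L] at hPf
        have hgt := pvTupLt_false_gt _ _ hPf
        refine aLoop_break rngs end_ 0 begin_ h0L (le_of_lt hgt) ?_
        have hno := hN rngs[0] (rngs.getElem_mem h0L)
        have hm1 : max begin_ rngs[0].1 = rngs[0].1 := max_eq_right (le_of_lt hgt)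
        have hm2 : min end_ rngs[0].2 = min rngs[0].2 end_ := min_comm _ _
        rw [hm1, hm2] at hno
        intro hcon
        exact hno (by omega)
    · rw [if_neg hr0]
      have hr1 : 1 ≤ r := by omega
      have hidxL : r - 1 < rngs.length := by omega
      have htn : ((r : Int) - 1).toNat = r - 1 := by omega
      have hgetd : rngs.getD ((r : Int) - 1).toNat (0, 0) = rngs[r - 1] := by
        rw [htn, List.getD_eq_getElem _ _ hidxL]
      rw [hgetd]
      have hPt : pvTupLt rngs[r - 1] (begin_ + 1, begin_ + 1) = true := by
        rcases hr0P with hEq | hPt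
        · omega
        · rwa [List.getD_eq_getElem _ _ hidxL] at hPt
      have hle : rngs[r - 1].1 ≤ begin_ :=
        pvTupLt_true_le _ _ (hcav _ (rngs.getElem_mem hidxL)) hPt
      have hnone : ¬ begin_ < rngs[r - 1].2 := by
        intro hlt2
        have hno := hN rngs[r - 1] (rngs.getElem_mem hidxL)
        have hm1 : max begin_ rngs[r - 1].1 = begin_ := max_eq_left hle
        rw [hm1] at hno
        exact hno (by omega)
      rw [if_neg hnone]
      dsimp only
      have ht1 : ((r : Int) - 1 + 1).toNat = r := by omega
      rw [ht1]
      by_cases hrL' : rngs.length ≤ r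
      · exact aLoop_nil rngs end_ r begin_ hrL'
      · have hrlt : r < rngs.length := by omega
        have hPf : pvTupLt rngs[r] (begin_ + 1, begin_ + 1) = false := by
          rcases hrLP with hEq | hPf
          · omega
          · rwa [List.getD_eq_getElem _ _ hrlt] at hPf
        have hgt := pvTupLt_false_gt _ _ hPf
        refine aLoop_break rngs end_ r begin_ hrlt (le_of_lt hgt) ?_
        have hno := hN rngs[r] (rngs.getElem_mem hrlt)
        have hm1 : max begin_ rngs[r].1 = rngs[r].1 := max_eq_right (le_of_lt hgt)
        have hm2 : min end_ rngs[r].2 = min rngs[r].2 end_ := min_comm _ _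
        rw [hm1, hm2] at hno
        intro hcon
        exact hno (by omega)
  · -- case 3: only the head range intersects; every later range starts at/after end
    obtain ⟨hne, hhead, htail⟩ := hD2
    rcases hrngs : rngs with _ | ⟨p0, rest⟩
    · exact absurd hrngs hne
    subst hrngs
    have h0L : 0 < (p0 :: rest).length := by simp
    have hp00 : (p0 :: rest)[0] = p0 := rfl
    have hint : max begin_ p0.1 < min end_ p0.2 := by
      apply hhead; simp
    have htail' : ∀ _ : 0 + 1 < (p0 :: rest).length, end_ ≤ (p0 :: rest)[0 + 1].1 := by
      intro h1L
      have : (p0 :: rest)[0 + 1] ∈ rest := by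
        have h1r : 0 < rest.length := by simpa using h1L
        simp only [List.getElem_cons_succ]
        exact rest.getElem_mem h1r
      exact htail _ this
    have hr01 : r = 0 ∨ r = 1 := by
      by_contra hcon
      have hr2 : 2 ≤ r := by omega
      have hidxL : r - 1 < (p0 :: rest).length := by omega
      have hPt : pvTupLt (p0 :: rest)[r - 1] (begin_ + 1, begin_ + 1) = true := by
        rcases hr0P with hEq | hPt
        · omega
        · rwa [List.getD_eq_getElem _ _ hidxL] at hPt
      have hle : (p0 :: rest)[r - 1].1 ≤ begin_ :=
        pvTupLt_true_le _ _ (hcav _ ((p0 :: rest).getElem_mem hidxL)) hPt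
      have hmem : (p0 :: rest)[r - 1] ∈ rest := by
        have hr2L : r - 2 < rest.length := by simp at hidxL; omega
        have hgeq : (p0 :: rest)[r - 1] = rest[r - 2] := by
          have h1 : (p0 :: rest)[r - 1]? = rest[r - 2]? := by
            rw [List.getElem?_cons]
            have hne0 : ¬ r - 1 = 0 := by omega
            rw [if_neg hne0]
            have h12 : r - 1 - 1 = r - 2 := by omega
            rw [h12]
          rw [List.getElem?_eq_getElem hidxL, List.getElem?_eq_getElem hr2L] at h1
          exact Option.some.inj h1
        rw [hgeq]
        exact rest.getElem_mem hr2L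
      have := htail _ (by simpa using hmem)
      omega
    have hB : pvBLoop begin_ end_ 0 (p0 :: rest) =
        [((0 : Int), (max begin_ p0.1, min end_ p0.2))] :=
      bLoop_yield_break begin_ end_ 0 p0 rest hint htail
    rw [hB]
    unfold pvGetMaybe
    simp only [← hL, ← hr]
    rcases hr01 with hre | hre
    · -- bisect returned 0: A's prologue is skipped, the loop from 0 yields the head
      have hr0 : (r : Int) - 1 < 0 := by omega
      rw [if_pos hr0]
      dsimp only
      have ht0 : ((r : Int) - 1 + 1).toNat = 0 := by omega
      rw [ht0]
      have hPf : pvTupLt (p0 :: rest)[0] (begin_ + 1, begin_ + 1) = false := by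
        rcases hrLP with hEq | hPf
        · rw [hre] at hEq; simp at hEq
        · rw [hre] at hPf; rwa [List.getD_eq_getElem _ _ h0L] at hPf
      rw [hp00] at hPf
      have hgt := pvTupLt_false_gt _ _ hPf
      have hA := aLoop_yield_break (p0 :: rest) end_ 0 begin_ h0L
        (by rw [hp00]; exact le_of_lt hgt)
        (by rw [hp00]; rw [min_comm p0.2 end_]; exact hint) htail'
      rw [hA, hp00, min_comm p0.2 end_]
      simp
    · -- bisect returned 1: A's prologue yields the head, the loop from 1 breaks
      have hr0 : ¬ (r : Int) - 1 < 0 := by omega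
      rw [if_neg hr0]
      have htn0 : ((r : Int) - 1).toNat = 0 := by omega
      have hgetd : (p0 :: rest).getD ((r : Int) - 1).toNat (0, 0) = p0 := by
        rw [htn0]
        rfl
      rw [hgetd]
      have hPt : pvTupLt p0 (begin_ + 1, begin_ + 1) = true := by
        rcases hr0P with hEq | hPt
        · omega
        · have hidx0 : r - 1 = 0 := by omega
          rw [hidx0] at hPt
          rwa [List.getD_eq_getElem _ _ h0L] at hPt
      have hle : p0.1 ≤ begin_ :=
        pvTupLt_true_le _ _ (hcav _ List.mem_cons_self) hPt
      have hcont : begin_ < p0.2 := by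
        have h1 : begin_ ≤ max begin_ p0.1 := le_max_left _ _
        have h2 : min end_ p0.2 ≤ p0.2 := min_le_right _ _
        omega
      rw [if_pos hcont]
      dsimp only
      have ht1 : ((r : Int) - 1 + 1).toNat = 1 := by omega
      rw [ht1]
      have hAtail : pvALoop (p0 :: rest) end_ 1 (min p0.2 end_) = [] := by
        cases rest with
        | nil => exact aLoop_nil _ end_ 1 _ (by simp)
        | cons q rest' =>
          have h1L : 1 < (p0 :: q :: rest').length := by simp
          have hq : (p0 :: q :: rest')[1] = q := rfl
          have hqtl : end_ ≤ q.1 := htail q (by simp)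
          refine aLoop_break _ end_ 1 _ h1L ?_ ?_
          · rw [hq]; exact le_trans (min_le_right _ _) hqtl
          · rw [hq]
            have hm : max (min p0.2 end_) q.1 = q.1 :=
              max_eq_right (le_trans (min_le_right _ _) hqtl)
            rw [hm]
            have : min q.2 end_ ≤ end_ := min_le_right _ _
            omega
      rw [hAtail]
      have hre' : ((r : Int) - 1) = 0 := by omega
      rw [hre']
      have hmx : max begin_ p0.1 = begin_ := max_eq_left hle
      rw [hmx, min_comm end_ p0.2]
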